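-- pv_equiv track=rewrite | github.com/AutoclickerI/Baekjoon | 백준/Bronze/7015. Millennium/Millennium.py | serial_day
-- ===== SOURCE A (Python) =====
-- def days_in_year(year):
--     # 연도가 3의 배수인 경우 10개의 대월(20일)
--     if year % 3 == 0:
--         return 10 * 20
--     # 그렇지 않으면 대월과 소월이 번갈아, 대월 5개(20일) + 소월 5개(19일)
--     return 5 * 20 + 5 * 19
--
-- def days_in_month(year, month):
--     # 3의 배수해인 경우 모든 월이 대월(20일)
--     if year % 3 == 0:
--         return 20
--     # 그렇지 않으면 홀수월 대월(20일), 짝수월 소월(19일)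
--     return 20 if month % 2 == 1 else 19
--
-- def serial_day(year, month, day):
--     # 시작일(1/1/1)부터 해당일까지의 누적 일수
--     total = 0
--     for y in range(1, year):
--         total += days_in_year(y)
--     for m in range(1, month):
--         total += days_in_month(year, m)
--     total += day
--     return total
-- ===== SOURCE B (Python) =====
-- def serial_day(year, month, day):
--     # Closed form: years 1..year-1 contribute 195 each plus 5 extra per multiple of 3;
--     # months 1..month-1 contribute 20 each in a multiple-of-3 year, else 20 per odd and 19 per even month.
--     n = max(year - 1, 0)
--     total = 195 * n + 5 * (n // 3)
--     m = max(month - 1, 0)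
--     if year % 3 == 0:
--         total += 20 * m
--     else:
--         total += 20 * ((m + 1) // 2) + 19 * (m // 2)
--     return total + day
-- ===== Notes on version B (the rewrite author's own statement) =====
-- stated objective: faster
-- what changed: Replaced the two summation loops over years and months with a closed-form arithmetic formula counting multiples of 3 among past years and odd/even months directly.
import Mathlib
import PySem

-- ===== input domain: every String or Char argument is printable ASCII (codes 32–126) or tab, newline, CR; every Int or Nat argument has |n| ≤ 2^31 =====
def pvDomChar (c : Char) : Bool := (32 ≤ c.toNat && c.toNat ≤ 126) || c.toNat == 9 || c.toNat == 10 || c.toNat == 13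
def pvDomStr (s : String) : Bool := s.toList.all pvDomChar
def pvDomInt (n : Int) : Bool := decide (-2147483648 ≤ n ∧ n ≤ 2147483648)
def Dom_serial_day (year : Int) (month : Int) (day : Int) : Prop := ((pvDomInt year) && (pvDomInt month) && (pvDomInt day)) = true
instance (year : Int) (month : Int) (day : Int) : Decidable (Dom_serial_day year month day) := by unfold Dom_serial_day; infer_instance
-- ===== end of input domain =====

-- B computes the same cumulative day count by a closed-form O(1) formula instead of A's O(year+month) loops.

-- ===== PORT A =====
def days_in_year (year : Int) : Int :=
  if PySem.Int.mod year 3 = 0 then 10 * 20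
  else 5 * 20 + 5 * 19

def days_in_month (year : Int) (month : Int) : Int :=
  if PySem.Int.mod year 3 = 0 then 20
  else if PySem.Int.mod month 2 = 1 then 20 else 19

def serial_day (year : Int) (month : Int) (day : Int) : Int :=
  let total : Int := 0
  let total := (PySem.List.pyRange 1 year 1).foldl (fun t y => t + days_in_year y) total
  let total := (PySem.List.pyRange 1 month 1).foldl (fun t m => t + days_in_month year m) total
  total + day

-- ===== PORT B =====
def serial_day_alt (year : Int) (month : Int) (day : Int) : Int :=
  let n : Int := max (year - 1) 0
  let total : Int := 195 * n + 5 * PySem.Int.floordiv n 3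
  let m : Int := max (month - 1) 0
  let total :=
    if PySem.Int.mod year 3 = 0 then total + 20 * m
    else total + (20 * PySem.Int.floordiv (m + 1) 2 + 19 * PySem.Int.floordiv m 2)
  total + day

-- ===== PRECONDITION & SPEC =====
def Spec_serial_day (year : Int) (month : Int) (day : Int) (out : Int) : Prop := out = serial_day_alt year month day
instance (year : Int) (month : Int) (day : Int) (out : Int) : Decidable (Spec_serial_day year month day out) := by unfold Spec_serial_day; infer_instance

-- ===== CLAIM (what is proved, stated in full; the proofs are below) =====
def Claim_equal_serial_day : Prop := ∀ (year : Int) (month : Int) (day : Int), Dom_serial_day year month day → Spec_serial_day year month day (serial_day year month day)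

-- ===== LEMMAS AND PROOFS =====

-- sum over years 1..n of days_in_year equals the closed form
lemma year_fold (n : Nat) (init : Int) :
    (PySem.List.pyRange 1 (1 + n) 1).foldl (fun t y => t + days_in_year y) init
      = init + 195 * n + 5 * ((n : Int) / 3) := by
  induction n generalizing init with
  | zero => simp [PySem.List.pyRange_one_eq_nil]
  | succ k ih =>
      have h : (1 : Int) ≤ 1 + k := by omega
      rw [show (1 : Int) + (k + 1 : Nat) = (1 + (k : Int)) + 1 by push_cast; ring,
        PySem.List.pyRange_one_succ_right h, List.foldl_append]
      have := ih init
      rw [show (1 : Int) + (k : Nat) = 1 + (k : Int) by push_cast; ring] at this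
      rw [this]
      simp only [List.foldl, days_in_year]
      have hmod : PySem.Int.mod (1 + (k : Int)) 3 = (1 + (k : Int)) % 3 :=
        PySem.Int.mod_eq_emod_of_pos (by norm_num)
      by_cases hd : (1 + (k : Int)) % 3 = 0
      · rw [hmod]; simp only [hd, if_pos rfl]
        push_cast
        omega
      · rw [hmod, if_neg hd]
        push_cast
        omega

-- sum over months 1..m of days_in_month equals the closed form
lemma month_fold (year : Int) (m : Nat) (init : Int) :
    (PySem.List.pyRange 1 (1 + m) 1).foldl (fun t x => t + days_in_month year x) init
      = init + (if PySem.Int.mod year 3 = 0 then 20 * (m : Int)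
                else 20 * (((m : Int) + 1) / 2) + 19 * ((m : Int) / 2)) := by
  induction m generalizing init with
  | zero => simp [PySem.List.pyRange_one_eq_nil]
  | succ k ih =>
      have h : (1 : Int) ≤ 1 + k := by omega
      rw [show (1 : Int) + (k + 1 : Nat) = (1 + (k : Int)) + 1 by push_cast; ring,
        PySem.List.pyRange_one_succ_right h, List.foldl_append]
      have := ih init
      rw [show (1 : Int) + (k : Nat) = 1 + (k : Int) by push_cast; ring] at this
      rw [this]
      simp only [List.foldl, days_in_month]
      have hmod : PySem.Int.mod (1 + (k : Int)) 2 = (1 + (k : Int)) % 2 :=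
        PySem.Int.mod_eq_emod_of_pos (by norm_num)
      by_cases hy : PySem.Int.mod year 3 = 0
      · simp only [hy, if_pos rfl]; push_cast; ring
      · simp only [hy, if_neg, ite_false, hmod]
        by_cases ho : (1 + (k : Int)) % 2 = 1
        · rw [if_pos ho]; push_cast; omega
        · rw [if_neg ho]; push_cast; omega

-- ===== VERDICT (by name: the statement is the Claim_ definition above) =====
theorem serial_day_spec : Claim_equal_serial_day := by
  intro year month day _
  unfold Spec_serial_day serial_day serial_day_alt
  have hy : PySem.Int.floordiv (max (year - 1) 0) 3 = max (year - 1) 0 / 3 :=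
    PySem.Int.floordiv_eq_ediv_of_pos (by norm_num)
  have hm1 : PySem.Int.floordiv (max (month - 1) 0 + 1) 2 = (max (month - 1) 0 + 1) / 2 :=
    PySem.Int.floordiv_eq_ediv_of_pos (by norm_num)
  have hm2 : PySem.Int.floordiv (max (month - 1) 0) 2 = max (month - 1) 0 / 2 :=
    PySem.Int.floordiv_eq_ediv_of_pos (by norm_num)
  simp only [hy, hm1, hm2]
  by_cases hyr : 1 ≤ year
  · have hn : year = 1 + ((year - 1).toNat : Int) := by omega
    by_cases hmo : 1 ≤ month
    · have hmn : month = 1 + ((month - 1).toNat : Int) := by omega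
      rw [hn, hmn, year_fold, month_fold]
      have e1 : max (1 + ((year - 1).toNat : Int) - 1) 0 = ((year - 1).toNat : Int) := by omega
      have e2 : max (1 + ((month - 1).toNat : Int) - 1) 0 = ((month - 1).toNat : Int) := by omega
      rw [e1, e2]
      split_ifs <;> ring
    · rw [hn, year_fold, PySem.List.pyRange_one_eq_nil (by omega)]
      have e1 : max (1 + ((year - 1).toNat : Int) - 1) 0 = ((year - 1).toNat : Int) := by omega
      have e2 : max (month - 1) 0 = 0 := by omega
      rw [e1, e2]
      simp only [List.foldl_nil]
      split_ifs <;> ring_nf <;> omega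
  · rw [PySem.List.pyRange_one_eq_nil (by omega : year ≤ 1)]
    have e1 : max (year - 1) 0 = 0 := by omega
    rw [e1]
    by_cases hmo : 1 ≤ month
    · have hmn : month = 1 + ((month - 1).toNat : Int) := by omega
      rw [hmn, List.foldl_nil, month_fold]
      have e2 : max (1 + ((month - 1).toNat : Int) - 1) 0 = ((month - 1).toNat : Int) := by omega
      rw [e2]
      split_ifs <;> ring_nf <;> omega
    · rw [PySem.List.pyRange_one_eq_nil (by omega : month ≤ 1)]
      have e2 : max (month - 1) 0 = 0 := by omega
      rw [e2]
      simp only [List.foldl_nil]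
      split_ifs <;> ring_nf <;> omega
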